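-- pv_equiv track=rewrite | github.com/aksras6/kapidhwaj | universe.py | _estimate_sector_breakdown
-- ===== SOURCE A (Python) =====
-- from typing import Dict, List, Optional, Set
--
-- def _estimate_sector_breakdown(symbols: List[str]) -> Dict[str, int]:
--     """Rough sector estimation based on known symbols"""
--
--     tech_symbols = {"AAPL", "MSFT", "GOOGL", "GOOG", "META", "NVDA", "ADBE", "CRM", "NFLX", "INTC", "AMD", "ORCL"}
--     healthcare_symbols = {"JNJ", "PFE", "UNH", "ABBV", "TMO", "ABT", "LLY", "AMGN", "GILD", "MDT"}
--     finance_symbols = {"JPM", "BAC", "WFC", "C", "GS", "MS", "V", "MA", "AXP", "BLK"}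
--
--     sector_counts = {
--         "Technology": len([s for s in symbols if s in tech_symbols]),
--         "Healthcare": len([s for s in symbols if s in healthcare_symbols]),
--         "Financials": len([s for s in symbols if s in finance_symbols]),
--         "Other": 0
--     }
--
--     accounted = sum(sector_counts.values())
--     sector_counts["Other"] = len(symbols) - accounted
--
--     return sector_counts
-- ===== SOURCE B (Python) =====
-- def _estimate_sector_breakdown(symbols):
--     """Rough sector estimation based on known symbols"""
--
--     sector_members = (
--         ("Technology", ("AAPL", "MSFT", "GOOGL", "GOOG", "META", "NVDA", "ADBE", "CRM", "NFLX", "INTC", "AMD", "ORCL")),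
--         ("Healthcare", ("JNJ", "PFE", "UNH", "ABBV", "TMO", "ABT", "LLY", "AMGN", "GILD", "MDT")),
--         ("Financials", ("JPM", "BAC", "WFC", "C", "GS", "MS", "V", "MA", "AXP", "BLK")),
--     )
--
--     symbol_to_sector = {}
--     for sector, members in sector_members:
--         for s in members:
--             symbol_to_sector[s] = sector
--
--     counts = {"Technology": 0, "Healthcare": 0, "Financials": 0, "Other": 0}
--     for s in symbols:
--         k = symbol_to_sector.get(s, "Other")
--         counts[k] = counts[k] + 1
--     return counts
-- ===== Notes on version B (the rewrite author's own statement) =====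
-- stated objective: idiomatic
-- what changed: Replaced A's three separate filter passes plus a subtraction for 'Other' by one inverted-index dict (symbol -> sector) and a single counting pass over symbols that increments the looked-up bucket.
import Mathlib
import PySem

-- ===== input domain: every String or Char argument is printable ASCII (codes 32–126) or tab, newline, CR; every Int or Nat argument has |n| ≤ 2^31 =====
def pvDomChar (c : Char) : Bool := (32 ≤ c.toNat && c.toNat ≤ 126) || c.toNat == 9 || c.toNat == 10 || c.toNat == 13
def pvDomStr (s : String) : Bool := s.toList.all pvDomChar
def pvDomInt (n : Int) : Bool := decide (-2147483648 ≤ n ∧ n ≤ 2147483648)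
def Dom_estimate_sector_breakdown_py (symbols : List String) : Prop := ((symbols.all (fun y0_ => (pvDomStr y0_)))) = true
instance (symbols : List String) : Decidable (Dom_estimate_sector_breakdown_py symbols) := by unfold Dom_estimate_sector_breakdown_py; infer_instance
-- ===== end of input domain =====

-- B is a genuinely different traversal: one inverted-index dict (symbol -> sector) and a single
-- counting pass, instead of A's three filter passes plus a subtraction for "Other". Return-value
-- equivalence only (neither program mutates its argument).

-- ===== PORT A =====
-- the three literal symbol sets of A
def pvTech : List String := ["AAPL", "MSFT", "GOOGL", "GOOG", "META", "NVDA", "ADBE", "CRM", "NFLX", "INTC", "AMD", "ORCL"]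
def pvHealth : List String := ["JNJ", "PFE", "UNH", "ABBV", "TMO", "ABT", "LLY", "AMGN", "GILD", "MDT"]
def pvFin : List String := ["JPM", "BAC", "WFC", "C", "GS", "MS", "V", "MA", "AXP", "BLK"]

def estimate_sector_breakdown_py (symbols : List String) : List (String × Int) :=
  let tech_symbols := PySem.Set.ofList pvTech
  let healthcare_symbols := PySem.Set.ofList pvHealth
  let finance_symbols := PySem.Set.ofList pvFin
  let sector_counts : PySem.Dict String Int := PySem.Dict.ofList
    [ ("Technology", ((symbols.filter (fun s => PySem.Set.contains tech_symbols s)).length : Int))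
    , ("Healthcare", ((symbols.filter (fun s => PySem.Set.contains healthcare_symbols s)).length : Int))
    , ("Financials", ((symbols.filter (fun s => PySem.Set.contains finance_symbols s)).length : Int))
    , ("Other", 0) ]
  let accounted := sector_counts.values.sum
  let sector_counts := sector_counts.insert "Other" ((symbols.length : Int) - accounted)
  sector_counts.items

-- ===== PORT B =====
-- the (sector, members) table of Source B
def pvSectorMembers : List (String × List String) :=
  [("Technology", pvTech), ("Healthcare", pvHealth), ("Financials", pvFin)]

-- symbol_to_sector, built by Source B's nested insertion loop
def pvSymbolToSector : PySem.Dict String String :=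
  pvSectorMembers.foldl (fun d p => p.2.foldl (fun d s => d.insert s p.1) d) PySem.Dict.empty

-- body of Source B's counting loop (counts[k] = counts[k] + 1; k is always a key of counts,
-- so Python's counts[k] is its getD value)
def pvStep (d : PySem.Dict String Int) (s : String) : PySem.Dict String Int :=
  let k := pvSymbolToSector.getD s "Other"
  d.insert k (d.getD k 0 + 1)

def estimate_sector_breakdown_py_alt (symbols : List String) : List (String × Int) :=
  let counts : PySem.Dict String Int :=
    PySem.Dict.ofList [("Technology", 0), ("Healthcare", 0), ("Financials", 0), ("Other", 0)]
  (symbols.foldl pvStep counts).items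

-- ===== PRECONDITION & SPEC =====
def Spec_estimate_sector_breakdown_py (symbols : List String) (out : List (String × Int)) : Prop := out = estimate_sector_breakdown_py_alt symbols
instance (symbols : List String) (out : List (String × Int)) : Decidable (Spec_estimate_sector_breakdown_py symbols out) := by unfold Spec_estimate_sector_breakdown_py; infer_instance

-- ===== CLAIM (what is proved, stated in full; the proofs are below) =====
def Claim_equal_estimate_sector_breakdown_py : Prop := ∀ (symbols : List String), Dom_estimate_sector_breakdown_py symbols → Spec_estimate_sector_breakdown_py symbols (estimate_sector_breakdown_py symbols)

-- ===== LEMMAS AND PROOFS =====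

-- classification: what the lookup returns, in terms of the three literal lists
lemma cls_spec (s : String) : pvSymbolToSector.getD s "Other" =
    (if s ∈ pvTech then "Technology" else if s ∈ pvHealth then "Healthcare"
     else if s ∈ pvFin then "Financials" else "Other") := by
  by_cases hT : s ∈ pvTech
  · simp only [hT, if_pos]
    fin_cases hT <;> decide
  · by_cases hH : s ∈ pvHealth
    · simp only [hT, hH, if_pos, ite_false]
      fin_cases hH <;> decide
    · by_cases hF : s ∈ pvFin
      · simp only [hT, hH, hF, if_pos, ite_false]
        fin_cases hF <;> decide
      · simp only [hT, hH, hF, ite_false]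
        have hk : pvSymbolToSector.keys = pvTech ++ pvHealth ++ pvFin := by decide
        have : s ∉ pvSymbolToSector.keys := by
          rw [hk]; simp [hT, hH, hF]
        rw [PySem.Dict.getD_eq_get?_getD, (PySem.Dict.get?_eq_none_iff_not_mem_keys _ _).mpr this]
        rfl

-- Bool bucket predicates derived from the lookup
def bT (s : String) : Bool := pvSymbolToSector.getD s "Other" == "Technology"
def bH (s : String) : Bool := pvSymbolToSector.getD s "Other" == "Healthcare"
def bF (s : String) : Bool := pvSymbolToSector.getD s "Other" == "Financials"
def bO (s : String) : Bool := pvSymbolToSector.getD s "Other" == "Other"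

lemma bT_eq (s : String) : bT s = decide (s ∈ pvTech) := by
  simp only [bT, cls_spec]; split_ifs <;> simp_all
lemma bH_eq (s : String) : bH s = decide (s ∈ pvHealth) := by
  simp only [bH, cls_spec]
  by_cases hT : s ∈ pvTech
  · have : s ∉ pvHealth := by fin_cases hT <;> decide
    simp [hT, this]
  · split_ifs <;> simp_all
lemma bF_eq (s : String) : bF s = decide (s ∈ pvFin) := by
  simp only [bF, cls_spec]
  by_cases hT : s ∈ pvTech
  · have : s ∉ pvFin := by fin_cases hT <;> decide
    simp [hT, this]
  · by_cases hH : s ∈ pvHealth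
    · have : s ∉ pvFin := by fin_cases hH <;> decide
      simp [hT, hH, this]
    · split_ifs <;> simp_all

-- the four buckets are exhaustive and mutually exclusive
lemma bucket_split (s : String) :
    (if bT s then (1 : Int) else 0) + (if bH s then 1 else 0) + (if bF s then 1 else 0)
      + (if bO s then 1 else 0) = 1 := by
  simp only [bT, bH, bF, bO, cls_spec]
  split_ifs <;> simp_all

-- the counting loop over the four-key dict
lemma foldB (xs : List String) (a b c d : Int) :
    xs.foldl pvStep (PySem.Dict.mk [("Technology", a), ("Healthcare", b), ("Financials", c), ("Other", d)]) =
    PySem.Dict.mk [ ("Technology", a + (xs.countP bT : Int)), ("Healthcare", b + (xs.countP bH : Int))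
                  , ("Financials", c + (xs.countP bF : Int)), ("Other", d + (xs.countP bO : Int)) ] := by
  induction xs generalizing a b c d with
  | nil => simp
  | cons x xs ih =>
    have h4 : pvSymbolToSector.getD x "Other" = "Technology" ∨ pvSymbolToSector.getD x "Other" = "Healthcare"
        ∨ pvSymbolToSector.getD x "Other" = "Financials" ∨ pvSymbolToSector.getD x "Other" = "Other" := by
      rw [cls_spec]; split_ifs <;> simp
    have hstep : ∀ (g : PySem.Dict String Int), List.foldl pvStep g (x :: xs) = List.foldl pvStep (pvStep g x) xs := by
      intro g; rfl
    rw [hstep]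
    have hbT : (List.countP bT (x :: xs) : Int) = (if bT x then 1 else 0) + (xs.countP bT : Int) := by
      rw [List.countP_cons]; split_ifs <;> simp [Int.add_comm]
    have hbH : (List.countP bH (x :: xs) : Int) = (if bH x then 1 else 0) + (xs.countP bH : Int) := by
      rw [List.countP_cons]; split_ifs <;> simp [Int.add_comm]
    have hbF : (List.countP bF (x :: xs) : Int) = (if bF x then 1 else 0) + (xs.countP bF : Int) := by
      rw [List.countP_cons]; split_ifs <;> simp [Int.add_comm]
    have hbO : (List.countP bO (x :: xs) : Int) = (if bO x then 1 else 0) + (xs.countP bO : Int) := by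
      rw [List.countP_cons]; split_ifs <;> simp [Int.add_comm]
    rcases h4 with h | h | h | h
    · have hb : bT x = true := by simp [bT, h]
      have hb2 : bH x = false := by simp [bH, h]
      have hb3 : bF x = false := by simp [bF, h]
      have hb4 : bO x = false := by simp [bO, h]
      have : pvStep (PySem.Dict.mk [("Technology", a), ("Healthcare", b), ("Financials", c), ("Other", d)]) x
          = PySem.Dict.mk [("Technology", a + 1), ("Healthcare", b), ("Financials", c), ("Other", d)] := by
        simp [pvStep, h, PySem.Dict.insert, PySem.Dict.getD_eq_get?_getD, PySem.Dict.get?_mk_cons,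
          PySem.Dict.contains]
      rw [this, ih, hbT, hbH, hbF, hbO, hb, hb2, hb3, hb4]
      simp; omega
    · have hb : bT x = false := by simp [bT, h]
      have hb2 : bH x = true := by simp [bH, h]
      have hb3 : bF x = false := by simp [bF, h]
      have hb4 : bO x = false := by simp [bO, h]
      have : pvStep (PySem.Dict.mk [("Technology", a), ("Healthcare", b), ("Financials", c), ("Other", d)]) x
          = PySem.Dict.mk [("Technology", a), ("Healthcare", b + 1), ("Financials", c), ("Other", d)] := by
        simp [pvStep, h, PySem.Dict.insert, PySem.Dict.getD_eq_get?_getD, PySem.Dict.get?_mk_cons,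
          PySem.Dict.contains]
      rw [this, ih, hbT, hbH, hbF, hbO, hb, hb2, hb3, hb4]
      simp; omega
    · have hb : bT x = false := by simp [bT, h]
      have hb2 : bH x = false := by simp [bH, h]
      have hb3 : bF x = true := by simp [bF, h]
      have hb4 : bO x = false := by simp [bO, h]
      have : pvStep (PySem.Dict.mk [("Technology", a), ("Healthcare", b), ("Financials", c), ("Other", d)]) x
          = PySem.Dict.mk [("Technology", a), ("Healthcare", b), ("Financials", c + 1), ("Other", d)] := by
        simp [pvStep, h, PySem.Dict.insert, PySem.Dict.getD_eq_get?_getD, PySem.Dict.get?_mk_cons,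
          PySem.Dict.contains]
      rw [this, ih, hbT, hbH, hbF, hbO, hb, hb2, hb3, hb4]
      simp; omega
    · have hb : bT x = false := by simp [bT, h]
      have hb2 : bH x = false := by simp [bH, h]
      have hb3 : bF x = false := by simp [bF, h]
      have hb4 : bO x = true := by simp [bO, h]
      have : pvStep (PySem.Dict.mk [("Technology", a), ("Healthcare", b), ("Financials", c), ("Other", d)]) x
          = PySem.Dict.mk [("Technology", a), ("Healthcare", b), ("Financials", c), ("Other", d + 1)] := by
        simp [pvStep, h, PySem.Dict.insert, PySem.Dict.getD_eq_get?_getD, PySem.Dict.get?_mk_cons,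
          PySem.Dict.contains]
      rw [this, ih, hbT, hbH, hbF, hbO, hb, hb2, hb3, hb4]
      simp; omega

-- sum of the bucket counts is the length
lemma buckets_length (xs : List String) :
    (xs.countP bT : Int) + (xs.countP bH : Int) + (xs.countP bF : Int) + (xs.countP bO : Int)
      = (xs.length : Int) := by
  induction xs with
  | nil => simp
  | cons x xs ih =>
    have h1 := bucket_split x
    simp only [List.countP_cons, List.length_cons]
    push_cast
    split_ifs at h1 ⊢ <;> simp_all <;> omega

-- ===== VERDICT (by name: the statement is the Claim_ definition above) =====
theorem estimate_sector_breakdown_py_spec : Claim_equal_estimate_sector_breakdown_py := by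
  intro symbols _
  show estimate_sector_breakdown_py symbols = estimate_sector_breakdown_py_alt symbols
  have hT : (List.filter (fun s => decide (s ∈ pvTech)) symbols).length = List.countP bT symbols := by
    rw [List.countP_eq_length_filter]
    apply congrArg
    apply List.filter_congr
    intro s _
    rw [bT_eq]
  have hH : (List.filter (fun s => decide (s ∈ pvHealth)) symbols).length = List.countP bH symbols := by
    rw [List.countP_eq_length_filter]
    apply congrArg
    apply List.filter_congr
    intro s _
    rw [bH_eq]
  have hF : (List.filter (fun s => decide (s ∈ pvFin)) symbols).length = List.countP bF symbols := by
    rw [List.countP_eq_length_filter]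
    apply congrArg
    apply List.filter_congr
    intro s _
    rw [bF_eq]
  have hAlt : estimate_sector_breakdown_py_alt symbols =
      [ ("Technology", (symbols.countP bT : Int)), ("Healthcare", (symbols.countP bH : Int))
      , ("Financials", (symbols.countP bF : Int)), ("Other", (symbols.countP bO : Int)) ] := by
    show (symbols.foldl pvStep _).items = _
    rw [show (PySem.Dict.ofList [("Technology", (0:Int)), ("Healthcare", 0), ("Financials", 0), ("Other", 0)])
        = PySem.Dict.mk [("Technology", (0:Int)), ("Healthcare", 0), ("Financials", 0), ("Other", 0)] from rfl]
    rw [foldB]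
    simp
  rw [hAlt]
  have hlen := buckets_length symbols
  simp only [estimate_sector_breakdown_py]
  simp [PySem.Dict.ofList, PySem.Dict.update, PySem.Dict.insert, PySem.Dict.contains,
    PySem.Dict.values, PySem.Dict.empty]
  refine ⟨hT, hH, hF, ?_⟩
  rw [hT, hH, hF]
  omega
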